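-- pv_equiv track=rewrite | github.com/pookaPlay/ohm | src/python_byte_sim/ohm/DataIO.py | DeserializeMSBTwos
-- ===== SOURCE A (Python) =====
-- def DeserializeMSBTwos(data):
--     input = data.copy()
--     NBits= len(input)
--     offset = 2**(NBits-1)
--     # flip MSB
--     input[0] = 1 - input[0]
--     thresholds = [2**i for i in range(NBits)]
--     thresholds.reverse()
--     result = sum([input[i] * thresholds[i] for i in range(NBits)])
--     result -= offset
--     return(result)
-- ===== SOURCE B (Python) =====
-- def DeserializeMSBTwos(data):
--     # Horner's method: no thresholds table, no copy/mutation; sign fix by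
--     # subtracting data[0] * 2**len(data)  (works for arbitrary int entries).
--     val = 0
--     for b in data:
--         val = val * 2 + b
--     return val - data[0] * 2 ** len(data)
-- ===== Notes on version B (the rewrite author's own statement) =====
-- stated objective: faster
-- what changed: Replaces the copied list, MSB flip, reversed power table and indexed comprehension sum by a single Horner fold (val=val*2+b) with a final two's-complement correction data[0]*2**len(data).
import Mathlib
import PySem

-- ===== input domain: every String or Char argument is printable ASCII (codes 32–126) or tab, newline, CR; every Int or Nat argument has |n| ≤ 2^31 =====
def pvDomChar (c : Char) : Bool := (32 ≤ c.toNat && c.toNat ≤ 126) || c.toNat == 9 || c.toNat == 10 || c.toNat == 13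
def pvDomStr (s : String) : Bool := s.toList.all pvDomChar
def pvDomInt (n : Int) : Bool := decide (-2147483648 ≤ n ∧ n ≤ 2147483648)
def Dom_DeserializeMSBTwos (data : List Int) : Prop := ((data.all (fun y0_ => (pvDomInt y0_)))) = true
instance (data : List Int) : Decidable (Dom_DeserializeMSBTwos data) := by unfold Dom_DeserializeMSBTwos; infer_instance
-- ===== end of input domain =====

-- B replaces A's list copy, MSB flip and reversed power table by a single Horner
-- fold with a final two's-complement correction (idiomatic; same O(n) time).


-- shared helper: Python's 2**i for a Nat exponent (kernel-evaluable pow)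
def pvPow2 : Nat → Int
  | 0 => 1
  | n + 1 => 2 * pvPow2 n

-- ===== PORT A =====
-- literal port of A: copy, flip MSB (input[0] = 1 - input[0]), build reversed
-- power table, indexed sum, subtract offset.  On [] Python raises IndexError at
-- input[0]; that input is excluded by Pre_ (the match arm for [] is never claimed).
def DeserializeMSBTwos (data : List Int) : Int :=
  let input := data
  let nBits := input.length
  let offset : Int := pvPow2 (nBits - 1)
  let input : List Int :=
    match input with
    | [] => []                 -- Python raises IndexError here (outside Pre_)
    | x :: xs => (1 - x) :: xs
  let thresholds := ((List.range nBits).map (fun i => pvPow2 i)).reverse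
  let result := ((List.range nBits).map
    (fun i => input.getD i 0 * thresholds.getD i 0)).sum
  result - offset

-- ===== PORT B =====
-- Horner fold, then subtract data[0] * 2^len.  data[0] on [] raises in Python
-- (outside Pre_); getD 0 is the total stand-in there.
def DeserializeMSBTwos_alt (data : List Int) : Int :=
  let val := data.foldl (fun v b => v * 2 + b) 0
  val - data.getD 0 0 * pvPow2 data.length

-- ===== PRECONDITION & SPEC =====
-- Pre_ excludes only the empty list, on which both Pythons raise IndexError.
def Pre_DeserializeMSBTwos (data : List Int) : Prop := data ≠ []
instance (data : List Int) : Decidable (Pre_DeserializeMSBTwos data) := by unfold Pre_DeserializeMSBTwos; infer_instance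
def pvWitness_DeserializeMSBTwos : List Int := [1, 0, 1]

def Spec_DeserializeMSBTwos (data : List Int) (out : Int) : Prop := out = DeserializeMSBTwos_alt data
instance (data : List Int) (out : Int) : Decidable (Spec_DeserializeMSBTwos data out) := by unfold Spec_DeserializeMSBTwos; infer_instance

-- ===== CLAIM (what is proved, stated in full; the proofs are below) =====
def Claim_equal_DeserializeMSBTwos : Prop := ∀ (data : List Int), Dom_DeserializeMSBTwos data → Pre_DeserializeMSBTwos data → Spec_DeserializeMSBTwos data (DeserializeMSBTwos data)

-- ===== LEMMAS AND PROOFS =====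

theorem pvPow2_eq (n : Nat) : pvPow2 n = 2 ^ n := by
  induction n with
  | zero => rfl
  | succ k ih => simp [pvPow2, ih, pow_succ]; ring

-- MSB-first weighted sum: W (x :: xs) = x * 2^|xs| + W xs.
def pvW : List Int → Int
  | [] => 0
  | x :: xs => x * 2 ^ xs.length + pvW xs

theorem pvHorner (xs : List Int) (v : Int) :
    xs.foldl (fun v b => v * 2 + b) v = v * 2 ^ xs.length + pvW xs := by
  induction xs generalizing v with
  | nil => simp [pvW]
  | cons x xs ih =>
    simp only [List.foldl_cons, pvW, List.length_cons, ih]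
    ring

theorem pvThresholds_getD (n i : ℕ) (hi : i < n) :
    (((List.range n).map (fun j => (2 : Int) ^ j)).reverse.getD i 0) = 2 ^ (n - 1 - i) := by
  rw [List.getD_eq_getElem?_getD, List.getElem?_reverse (by simpa using hi)]
  simp only [List.length_map, List.length_range]
  rw [List.getElem?_map, List.getElem?_range (by omega)]
  simp

theorem pvSum_eq_W (xs : List Int) :
    ((List.range xs.length).map
      (fun i => xs.getD i 0 * (((List.range xs.length).map (fun j => (2 : Int) ^ j)).reverse.getD i 0))).sum
    = pvW xs := by
  have h : ∀ (ys : List Int),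
      ((List.range ys.length).map (fun i => ys.getD i 0 * (2 : Int) ^ (ys.length - 1 - i))).sum
        = pvW ys := by
    intro ys
    induction ys with
    | nil => simp [pvW]
    | cons x xs ih =>
      rw [List.length_cons, List.range_succ_eq_map]
      simp only [List.map_cons, List.map_map, List.sum_cons]
      have : ((List.range xs.length).map
          ((fun i => (x :: xs).getD i 0 * (2 : Int) ^ (xs.length + 1 - 1 - i)) ∘ Nat.succ)).sum
          = ((List.range xs.length).map (fun i => xs.getD i 0 * (2 : Int) ^ (xs.length - 1 - i))).sum := by
        apply congrArg
        apply List.map_congr_left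
        intro i hi
        simp only [Function.comp_apply, List.getD_cons_succ]
        congr 2
        omega
      rw [this, ih, pvW]
      simp
  calc ((List.range xs.length).map
      (fun i => xs.getD i 0 * (((List.range xs.length).map (fun j => (2 : Int) ^ j)).reverse.getD i 0))).sum
      = ((List.range xs.length).map (fun i => xs.getD i 0 * (2 : Int) ^ (xs.length - 1 - i))).sum := by
        apply congrArg
        apply List.map_congr_left
        intro i hi
        rw [pvThresholds_getD xs.length i (by simpa using hi)]
    _ = pvW xs := h xs

-- ===== VERDICT (by name: the statement is the Claim_ definition above) =====
theorem DeserializeMSBTwos_spec : Claim_equal_DeserializeMSBTwos := by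
  intro data _ hpre
  unfold Spec_DeserializeMSBTwos DeserializeMSBTwos DeserializeMSBTwos_alt
  simp only [pvPow2_eq]
  match data, hpre with
  | x :: xs, _ =>
    simp only [List.length_cons]
    have hA := pvSum_eq_W ((1 - x) :: xs)
    simp only [List.length_cons] at hA
    rw [hA]
    rw [pvHorner]
    simp only [pvW, List.getD_cons_zero, List.length_cons]
    have : (2 : Int) ^ (xs.length + 1 - 1) = 2 ^ xs.length := by norm_num
    rw [this]
    ring
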